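-- pv_equiv track=rewrite | github.com/ricky855073/MGT1006 | Week6/hw5_1.py | mono_inc
-- ===== SOURCE A (Python) =====
-- def mono_inc(inlist, k=3):
--     # len_inlist = n, len_diff_list = n - 1
--     if k < 3:
--         k = 3
--     diff_list = list()
--     for i in range(len(inlist) - 1):
--         diff_list.append(inlist[i + 1] - inlist[i])
--
--     counter = 0
--     continue_list = list()
--     for i in range(len(diff_list)):
--         if diff_list[i] > 0:
--             counter += 1
--         elif diff_list[i - 1] > 0 and counter >= k:
--             continue_list.append([counter, i])
--             counter = 0
--         else:
--             counter = 0
--     if counter >= k: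
--         continue_list.append([counter, len(diff_list)])
--
--     return continue_list
-- ===== SOURCE B (Python) =====
-- def mono_inc(inlist, k=3):
--     if k < 3:
--         k = 3
--     n = len(inlist)
--     # indices whose diff is non-positive: they partition the diff list into maximal positive runs
--     boundaries = [i for i in range(n - 1) if inlist[i + 1] - inlist[i] <= 0]
--     res = []
--     prev = 0
--     for b in boundaries + [n - 1]:
--         run = b - prev
--         if run >= k:
--             res.append([run, b])
--         prev = b + 1
--     return res
-- ===== Notes on version B (the rewrite author's own statement) =====
-- stated objective: alternative
-- what changed: Replaces the stateful counter/elif loop over an explicitly built diff list (with its negative-index lookback diff_list[i-1]) by a boundary-index table: collect the indices whose adjacent diff is non-positive in one comprehension, which partitions the diff list into maximal increasing runs, and read each run length off as the gap between consecutive boundaries.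
import Mathlib
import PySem

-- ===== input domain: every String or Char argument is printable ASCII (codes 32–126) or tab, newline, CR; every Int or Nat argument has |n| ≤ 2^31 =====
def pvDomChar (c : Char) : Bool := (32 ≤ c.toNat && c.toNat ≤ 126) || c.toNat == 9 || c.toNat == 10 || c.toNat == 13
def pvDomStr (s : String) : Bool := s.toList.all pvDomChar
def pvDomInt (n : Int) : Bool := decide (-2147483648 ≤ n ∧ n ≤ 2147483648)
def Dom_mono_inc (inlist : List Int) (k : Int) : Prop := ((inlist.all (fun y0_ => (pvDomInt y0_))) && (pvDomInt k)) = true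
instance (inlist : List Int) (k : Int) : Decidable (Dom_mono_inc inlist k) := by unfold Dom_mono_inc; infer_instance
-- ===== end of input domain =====

-- B replaces A's stateful counter loop by a table of boundary indices (diff ≤ 0) and reads the
-- run lengths off as gaps between consecutive boundaries; same O(n) cost, different decomposition.

-- ===== PORT A =====
-- diff_list construction: indices i and i+1 are always in range, so pyGetD's default is never used (exact).
def pvDiffsA (inlist : List Int) : List Int :=
  (PySem.List.pyRange 0 ((inlist.length : Int) - 1) 1).foldl
    (fun dl i => dl ++ [PySem.List.pyGetD inlist (i + 1) 0 - PySem.List.pyGetD inlist i 0]) []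

-- the body of A's second loop; diff_list[i-1] at i = 0 is Python's negative-index wrap,
-- which pyGetD implements (the list is nonempty whenever the loop runs, so always in range).
def pvBodyA (k : Int) (dl : List Int) (s : Int × List (List Int)) (i : Int) : Int × List (List Int) :=
  if 0 < PySem.List.pyGetD dl i 0 then (s.1 + 1, s.2)
  else if 0 < PySem.List.pyGetD dl (i - 1) 0 ∧ k ≤ s.1 then (0, s.2 ++ [[s.1, i]])
  else (0, s.2)

def mono_inc (inlist : List Int) (k : Int) : List (List Int) :=
  let k := if k < 3 then 3 else k
  let diff_list := pvDiffsA inlist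
  let s := (PySem.List.pyRange 0 (diff_list.length : Int) 1).foldl (pvBodyA k diff_list) (0, [])
  if k ≤ s.1 then s.2 ++ [[s.1, (diff_list.length : Int)]] else s.2

-- ===== PORT B =====
def pvBodyB (k : Int) (s : List (List Int) × Int) (b : Int) : List (List Int) × Int :=
  (if k ≤ b - s.2 then s.1 ++ [[b - s.2, b]] else s.1, b + 1)

def mono_inc_alt (inlist : List Int) (k : Int) : List (List Int) :=
  let k := if k < 3 then 3 else k
  let n : Int := inlist.length
  let boundaries := (PySem.List.pyRange 0 (n - 1) 1).filter
    (fun i => decide (PySem.List.pyGetD inlist (i + 1) 0 - PySem.List.pyGetD inlist i 0 ≤ 0))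
  ((boundaries ++ [n - 1]).foldl (pvBodyB k) ([], 0)).1

-- ===== PRECONDITION & SPEC =====
def Spec_mono_inc (inlist : List Int) (k : Int) (out : List (List Int)) : Prop := out = mono_inc_alt inlist k
instance (inlist : List Int) (k : Int) (out : List (List Int)) : Decidable (Spec_mono_inc inlist k out) := by unfold Spec_mono_inc; infer_instance

-- ===== CLAIM (what is proved, stated in full; the proofs are below) =====
def Claim_equal_mono_inc : Prop := ∀ (inlist : List Int) (k : Int), Dom_mono_inc inlist k → Spec_mono_inc inlist k (mono_inc inlist k)

-- ===== LEMMAS AND PROOFS =====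

-- common state machine both loops are reduced to: walk the diff list with the current run length c
def pvRunCore (k : Int) : List Int → Int → Int → List (List Int) → Int × List (List Int)
  | [], _, c, out => (c, out)
  | d :: ds, i, c, out =>
    if 0 < d then pvRunCore k ds (i + 1) (c + 1) out
    else if k ≤ c then pvRunCore k ds (i + 1) 0 (out ++ [[c, i]])
    else pvRunCore k ds (i + 1) 0 out

def pvRunA (k : Int) (ds : List Int) (i c : Int) (out : List (List Int)) : List (List Int) :=
  let r := pvRunCore k ds i c out
  if k ≤ r.1 then r.2 ++ [[r.1, i + (ds.length : Int)]] else r.2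

-- boundary indices (diff ≤ 0) of a diff list, with absolute offset i
def pvBounds : List Int → Int → List Int
  | [], _ => []
  | d :: ds, i => if d ≤ 0 then i :: pvBounds ds (i + 1) else pvBounds ds (i + 1)

lemma pvDiffsA_eq_map (inlist : List Int) :
    pvDiffsA inlist = (PySem.List.pyRange 0 ((inlist.length : Int) - 1) 1).map
      (fun i => PySem.List.pyGetD inlist (i + 1) 0 - PySem.List.pyGetD inlist i 0) := by
  simpa [pvDiffsA] using
    PySem.List.foldl_append_singleton_eq_map
      (fun i => PySem.List.pyGetD inlist (i + 1) 0 - PySem.List.pyGetD inlist i 0)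
      (PySem.List.pyRange 0 ((inlist.length : Int) - 1) 1)

lemma pvFilter_eq_bounds (g : Int → Int) :
    ∀ (m : Nat) (a : Int),
      (PySem.List.pyRange a (a + m) 1).filter (fun i => decide (g i ≤ 0))
        = pvBounds ((PySem.List.pyRange a (a + m) 1).map g) a := by
  intro m
  induction m with
  | zero => intro a; simp [PySem.List.pyRange_one_eq_nil, pvBounds]
  | succ m ih =>
    intro a
    rw [PySem.List.pyRange_one_cons (by omega : a < a + (m + 1 : Nat))]
    have h : a + ((m : Int) + 1) = (a + 1) + (m : Int) := by ring
    push_cast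
    rw [h]
    by_cases hg : g a ≤ 0 <;> simp [pvBounds, hg, ih (a + 1)]

lemma A_loop (k : Int) (hk : 3 ≤ k) (ds : List Int) :
    ∀ (m i : Nat) (c : Int) (out : List (List Int)),
      ds.length = i + m →
      (k ≤ c → 1 ≤ i ∧ 0 < PySem.List.pyGetD ds ((i : Int) - 1) 0) →
      (PySem.List.pyRange (i : Int) (ds.length : Int) 1).foldl (pvBodyA k ds) (c, out)
        = pvRunCore k (ds.drop i) (i : Int) c out := by
  intro m
  induction m with
  | zero =>
    intro i c out hlen _
    rw [PySem.List.pyRange_one_eq_nil (by omega : (ds.length : Int) ≤ (i : Int))]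
    rw [List.drop_of_length_le (by omega)]
    simp [pvRunCore]
  | succ m ih =>
    intro i c out hlen hinv
    have hi : i < ds.length := by omega
    have hget : PySem.List.pyGetD ds (i : Int) 0 = ds[i] := by
      simp [PySem.List.pyGetD_natCast, List.getD_eq_getElem?_getD, hi]
    rw [PySem.List.pyRange_one_cons (by exact_mod_cast hi), List.drop_eq_getElem_cons hi,
      List.foldl_cons]
    by_cases hd : 0 < ds[i]
    · have hbody : pvBodyA k ds (c, out) (i : Int) = (c + 1, out) := by
        simp [pvBodyA, hget, hd]
      have hrun : pvRunCore k (ds[i] :: ds.drop (i + 1)) (i : Int) c out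
          = pvRunCore k (ds.drop (i + 1)) ((i : Int) + 1) (c + 1) out := by
        simp [pvRunCore, hd]
      rw [hbody, hrun]
      have := ih (i + 1) (c + 1) out (by omega)
        (by
          intro _
          refine ⟨by omega, ?_⟩
          have he : ((i + 1 : Nat) : Int) - 1 = (i : Int) := by push_cast; ring
          rw [he, hget]; exact hd)
      push_cast at this
      exact this
    · have hgn : ¬ 0 < PySem.List.pyGetD ds (i : Int) 0 := by rw [hget]; exact hd
      by_cases hc : k ≤ c
      · obtain ⟨hi1, hprev⟩ := hinv hc
        have hbody : pvBodyA k ds (c, out) (i : Int) = (0, out ++ [[c, (i : Int)]]) := by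
          simp only [pvBodyA]
          rw [if_neg hgn, if_pos (⟨hprev, hc⟩ : _ ∧ _)]
        have hrun : pvRunCore k (ds[i] :: ds.drop (i + 1)) (i : Int) c out
            = pvRunCore k (ds.drop (i + 1)) ((i : Int) + 1) 0 (out ++ [[c, (i : Int)]]) := by
          simp [pvRunCore, hd, hc]
        rw [hbody, hrun]
        have := ih (i + 1) 0 (out ++ [[c, (i : Int)]]) (by omega)
          (fun h => absurd h (by omega))
        push_cast at this
        exact this
      · have hbody : pvBodyA k ds (c, out) (i : Int) = (0, out) := by
          simp only [pvBodyA, if_neg hgn]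
          rw [if_neg (fun h => hc h.2)]
        have hrun : pvRunCore k (ds[i] :: ds.drop (i + 1)) (i : Int) c out
            = pvRunCore k (ds.drop (i + 1)) ((i : Int) + 1) 0 out := by
          simp [pvRunCore, hd, hc]
        rw [hbody, hrun]
        have := ih (i + 1) 0 out (by omega) (fun h => absurd h (by omega))
        push_cast at this
        exact this

lemma B_loop (k : Int) :
    ∀ (ds : List Int) (i c : Int) (out : List (List Int)),
      (pvBounds ds i ++ [i + (ds.length : Int)]).foldl (pvBodyB k) (out, i - c)
        = (pvRunA k ds i c out, i + (ds.length : Int) + 1) := by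
  intro ds
  induction ds with
  | nil =>
    intro i c out
    simp only [pvBounds, List.length_nil, Int.natCast_zero, add_zero, List.nil_append,
      List.foldl_cons, List.foldl_nil, pvBodyB, pvRunA, pvRunCore]
    rw [show i - (i - c) = c by ring]
  | cons d ds ih =>
    intro i c out
    have hlen : i + ((d :: ds).length : Int) = (i + 1) + (ds.length : Int) := by
      push_cast [List.length_cons]; ring
    by_cases hd : d ≤ 0
    · have hstep : pvBodyB k (out, i - c) i = (if k ≤ c then out ++ [[c, i]] else out, i + 1) := by
        simp only [pvBodyB]
        rw [show i - (i - c) = c by ring]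
      have hih := ih (i + 1) 0 (if k ≤ c then out ++ [[c, i]] else out)
      rw [show (i + 1 : Int) - 0 = i + 1 by ring] at hih
      have hRA : pvRunA k (d :: ds) i c out
          = pvRunA k ds (i + 1) 0 (if k ≤ c then out ++ [[c, i]] else out) := by
        by_cases hc : k ≤ c
        · simp [pvRunA, pvRunCore, show ¬ (0:Int) < d by omega, hc]
          ring_nf
        · simp [pvRunA, pvRunCore, show ¬ (0:Int) < d by omega, hc]
          ring_nf
      simp only [pvBounds, if_pos hd, List.cons_append, List.foldl_cons]
      rw [hstep, hlen, hih, hRA]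
    · have hih := ih (i + 1) (c + 1) out
      rw [show (i + 1 : Int) - (c + 1) = i - c by ring] at hih
      have hRA : pvRunA k (d :: ds) i c out = pvRunA k ds (i + 1) (c + 1) out := by
        simp [pvRunA, pvRunCore, show (0:Int) < d by omega]
        ring_nf
      simp only [pvBounds, if_neg hd]
      rw [hlen, hih, hRA]

-- ===== VERDICT (by name: the statement is the Claim_ definition above) =====
theorem mono_inc_spec : Claim_equal_mono_inc := by
  intro inlist k _
  unfold Spec_mono_inc mono_inc mono_inc_alt
  set k' := if k < 3 then 3 else k with hk'def
  have hk : 3 ≤ k' := by rw [hk'def]; split <;> omega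
  cases inlist with
  | nil =>
    have h1 : pvDiffsA ([] : List Int) = [] := by decide
    simp [h1, pvBodyB, if_neg (by omega : ¬ k' ≤ (0 : Int))]
    omega
  | cons x xs =>
    obtain ⟨ds, hds⟩ : ∃ ds, (PySem.List.pyRange 0 ((((x :: xs)).length : Int) - 1) 1).map
        (fun i => PySem.List.pyGetD (x :: xs) (i + 1) 0 - PySem.List.pyGetD (x :: xs) i 0)
          = ds := ⟨_, rfl⟩
    have hlen1 : (1 : Int) ≤ (((x :: xs)).length : Int) := by
      have : 1 ≤ (x :: xs).length := by simp
      exact_mod_cast this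
    have hdslen : (ds.length : Int) = (((x :: xs)).length : Int) - 1 := by
      rw [← hds]
      simp [PySem.List.length_pyRange_one]
    have hdiffs : pvDiffsA (x :: xs) = ds := by rw [pvDiffsA_eq_map, hds]
    have hbounds : (PySem.List.pyRange 0 ((((x :: xs)).length : Int) - 1) 1).filter
        (fun i => decide (PySem.List.pyGetD (x :: xs) (i + 1) 0 - PySem.List.pyGetD (x :: xs) i 0 ≤ 0))
        = pvBounds ds 0 := by
      have h := pvFilter_eq_bounds
        (fun i => PySem.List.pyGetD (x :: xs) (i + 1) 0 - PySem.List.pyGetD (x :: xs) i 0)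
        ((((x :: xs)).length : Int) - 1).toNat 0
      rw [show (0 : Int) + (((((x :: xs)).length : Int) - 1).toNat : Int)
            = (((x :: xs)).length : Int) - 1 by
          rw [Int.toNat_of_nonneg (by omega)]; ring] at h
      rw [hds] at h
      exact h
    have hA : (PySem.List.pyRange 0 (ds.length : Int) 1).foldl (pvBodyA k' ds) (0, [])
        = pvRunCore k' ds 0 0 [] := by
      have := A_loop k' hk ds ds.length 0 0 [] (by omega) (fun h => absurd h (by omega))
      simpa using this
    have hB := B_loop k' ds 0 0 []
    simp only [zero_add, sub_zero] at hB
    simp only [hdiffs, hbounds]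
    rw [hA, ← hdslen, hB]
    simp [pvRunA]
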